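-- pv_equiv track=rewrite | github.com/xiabiqing/NotifySync | windows/notify_server.py | choose_recommended_ip
-- ===== SOURCE A (Python) =====
-- def choose_recommended_ip(ips):
--     """推荐优先级：192.168.x.x > 10.x.x.x > 172.16-31.x.x > 其他"""
--     if not ips:
--         return None
--
--     # 按优先级排序
--     preferred_prefixes = [
--         '192.168.',  # 最常用，家庭/热点网络
--         '10.',
--         '172.16.', '172.17.', '172.18.', '172.19.',
--         '172.20.', '172.21.', '172.22.', '172.23.',
--         '172.24.', '172.25.', '172.26.', '172.27.',
--         '172.28.', '172.29.', '172.30.', '172.31.'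
--     ]
--
--     for prefix in preferred_prefixes:
--         for ip in ips:
--             if ip.startswith(prefix):
--                 return ip
--     return ips[0]
-- ===== SOURCE B (Python) =====
-- # priority order: 192.168.x.x, then 10.x.x.x, then the 172.16-31 block
-- _PREFIXES = ['192.168.', '10.'] + ['172.%d.' % i for i in range(16, 32)]
--
--
-- def _score(ip):
--     s = 0
--     for p in _PREFIXES:
--         if ip.startswith(p):
--             return s
--         s += 1
--     return s  # sentinel = len(_PREFIXES): matches no private prefix
--
--
-- def choose_recommended_ip(ips):
--     """推荐优先级：192.168.x.x > 10.x.x.x > 172.16-31.x.x > 其他"""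
--     if not ips:
--         return None
--     best_ip = ips[0]
--     best_score = _score(best_ip)
--     for ip in ips[1:]:
--         s = _score(ip)
--         if s < best_score:
--             best_ip, best_score = ip, s
--     return best_ip
-- ===== Notes on version B (the rewrite author's own statement) =====
-- stated objective: simpler
-- what changed: Replaces the nested prefix-by-prefix rescans of ips with a single pass that scores each ip once by its prefix priority and keeps the earliest minimum-score ip (the sentinel score makes ips[0] the automatic no-match fallback).
import Mathlib
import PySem

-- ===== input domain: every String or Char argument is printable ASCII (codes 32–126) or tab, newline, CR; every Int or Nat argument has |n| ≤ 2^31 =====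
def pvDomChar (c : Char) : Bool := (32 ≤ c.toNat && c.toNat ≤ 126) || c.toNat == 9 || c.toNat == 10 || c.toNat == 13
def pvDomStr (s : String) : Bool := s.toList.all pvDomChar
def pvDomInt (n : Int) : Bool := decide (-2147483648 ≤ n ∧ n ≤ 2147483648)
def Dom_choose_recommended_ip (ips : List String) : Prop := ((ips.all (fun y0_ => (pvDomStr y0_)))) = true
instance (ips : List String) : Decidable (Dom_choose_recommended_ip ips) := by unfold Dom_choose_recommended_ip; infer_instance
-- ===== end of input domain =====

-- B replaces A's nested prefix-by-prefix rescans of ips with a single scoring pass (simpler).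

-- the fixed priority list of private-network prefixes (same module constant in both programs)
def pvPrefixes : List String :=
  ["192.168.", "10.",
   "172.16.", "172.17.", "172.18.", "172.19.",
   "172.20.", "172.21.", "172.22.", "172.23.",
   "172.24.", "172.25.", "172.26.", "172.27.",
   "172.28.", "172.29.", "172.30.", "172.31."]

-- ===== PORT A =====
-- inner 'for ip in ips: if ip.startswith(prefix): return ip'
def pvAInner (p : String) : List String → Option String
  | [] => none
  | ip :: rest => if PySem.Str.startswith ip p then some ip else pvAInner p rest

-- outer 'for prefix in preferred_prefixes: …'
def pvAOuter (prefixes ips : List String) : Option String :=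
  match prefixes with
  | [] => none
  | p :: ps =>
    match pvAInner p ips with
    | some ip => some ip
    | none => pvAOuter ps ips

def choose_recommended_ip (ips : List String) : Option String :=
  match ips with
  | [] => none                                   -- if not ips: return None
  | x :: rest =>
    match pvAOuter pvPrefixes (x :: rest) with
    | some ip => some ip                         -- return ip inside the loops
    | none => some x                             -- return ips[0]

-- ===== PORT B =====
-- _score: priority index of the first matching prefix, len(_PREFIXES) if none
def pvScoreGo (ip : String) (ps : List String) (s : Nat) : Nat :=
  match ps with
  | [] => s
  | p :: rest => if PySem.Str.startswith ip p then s else pvScoreGo ip rest (s + 1)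

def pvScore (ip : String) : Nat := pvScoreGo ip pvPrefixes 0

-- the single pass keeping the earliest strictly-smaller score
def pvBLoop (ips : List String) (best : String) (bs : Nat) : String :=
  match ips with
  | [] => best
  | ip :: rest =>
    let s := pvScore ip
    if s < bs then pvBLoop rest ip s else pvBLoop rest best bs

def choose_recommended_ip_alt (ips : List String) : Option String :=
  match ips with
  | [] => none
  | x :: rest => some (pvBLoop rest x (pvScore x))

-- ===== PRECONDITION & SPEC =====
def Spec_choose_recommended_ip (ips : List String) (out : Option String) : Prop := out = choose_recommended_ip_alt ips
instance (ips : List String) (out : Option String) : Decidable (Spec_choose_recommended_ip ips out) := by unfold Spec_choose_recommended_ip; infer_instance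

-- ===== CLAIM (what is proved, stated in full; the proofs are below) =====
def Claim_equal_choose_recommended_ip : Prop := ∀ (ips : List String), Dom_choose_recommended_ip ips → Spec_choose_recommended_ip ips (choose_recommended_ip ips)

-- ===== LEMMAS AND PROOFS =====

-- generalized score over an arbitrary prefix list
def pvF (ps : List String) (ip : String) : Nat := pvScoreGo ip ps 0

-- generalized B loop over an arbitrary prefix list
def pvBLoopG (ps : List String) (ips : List String) (best : String) (bs : Nat) : String :=
  match ips with
  | [] => best
  | ip :: rest =>
    let s := pvF ps ip
    if s < bs then pvBLoopG ps rest ip s else pvBLoopG ps rest best bs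

-- minimum score in a list, with the sentinel ps.length as base
def pvMm (ps : List String) (l : List String) : Nat :=
  l.foldr (fun ip m => min (pvF ps ip) m) ps.length

theorem pvScoreGo_acc (ip : String) (ps : List String) (s : Nat) :
    pvScoreGo ip ps s = s + pvScoreGo ip ps 0 := by
  induction ps generalizing s with
  | nil => simp [pvScoreGo]
  | cons p rest ih =>
    simp only [pvScoreGo]
    by_cases h : PySem.Str.startswith ip p = true
    · rw [if_pos h, if_pos h]; omega
    · rw [if_neg h, if_neg h, ih (s+1), ih 1]; omega

theorem pvF_cons (ps : List String) (p ip : String) :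
    pvF (p :: ps) ip = if PySem.Str.startswith ip p then 0 else pvF ps ip + 1 := by
  simp only [pvF, pvScoreGo]
  by_cases h : PySem.Str.startswith ip p = true
  · rw [if_pos h, if_pos h]
  · rw [if_neg h, if_neg h, pvScoreGo_acc]; omega

theorem pvF_le (ps : List String) (ip : String) : pvF ps ip ≤ ps.length := by
  induction ps with
  | nil => simp [pvF, pvScoreGo]
  | cons p rest ih =>
    rw [pvF_cons]
    by_cases h : PySem.Str.startswith ip p = true
    · rw [if_pos h]; simp
    · rw [if_neg h]; simp only [List.length_cons]; omega

theorem pvMm_nil (l : List String) : pvMm [] l = 0 := by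
  induction l with
  | nil => rfl
  | cons x t ih =>
    simp only [pvMm, List.foldr] at *
    have : pvF [] x = 0 := rfl
    omega

theorem pvMm_le_mem (ps : List String) (x : String) (l : List String) (hl : x ∈ l) :
    pvMm ps l ≤ pvF ps x := by
  induction l with
  | nil => cases hl
  | cons y t ih =>
    rcases List.mem_cons.mp hl with h | h
    · subst h; simp only [pvMm, List.foldr]; omega
    · have := ih h; simp only [pvMm, List.foldr] at *; omega

theorem pvBLoop_eq_G (l : List String) (b : String) (s : Nat) :
    pvBLoop l b s = pvBLoopG pvPrefixes l b s := by
  induction l generalizing b s with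
  | nil => rfl
  | cons ip rest ih =>
    simp only [pvBLoop, pvBLoopG]
    have : pvScore ip = pvF pvPrefixes ip := rfl
    rw [this]
    by_cases h : pvF pvPrefixes ip < s <;> simp [h, ih]

-- find? is invariant under pointwise-on-members equal predicates
theorem pvFind_congr_mem {l : List String} {p q : String → Bool}
    (h : ∀ x ∈ l, p x = q x) : l.find? p = l.find? q := by
  induction l with
  | nil => rfl
  | cons x t ih =>
    simp only [List.find?]
    rw [h x (by simp)]
    by_cases hq : q x
    · simp [hq]
    · simp [hq]; exact ih (fun y hy => h y (by simp [hy]))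

-- the inner loop is find?
theorem pvAInner_eq_find (p : String) (ips : List String) :
    pvAInner p ips = ips.find? (fun ip => PySem.Str.startswith ip p) := by
  induction ips with
  | nil => rfl
  | cons ip rest ih =>
    simp only [pvAInner]
    by_cases h : PySem.Str.startswith ip p = true
    · rw [if_pos h]
      exact (List.find?_cons_of_pos (by exact h)).symm
    · rw [if_neg h, ih]
      exact (List.find?_cons_of_neg (by exact h)).symm

-- characterization of A's nested loops: none if no ip matches any prefix,
-- otherwise the first ip attaining the minimal score
theorem pvAOuter_char (ps ips : List String) :
    pvAOuter ps ips =
      if pvMm ps ips = ps.length ∧ 0 < ps.length ∨ ps = [] then none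
      else ips.find? (fun ip => pvF ps ip == pvMm ps ips) := by
  induction ps with
  | nil => simp [pvAOuter]
  | cons p ps ih =>
    simp only [pvAOuter, pvAInner_eq_find]
    cases hfind : ips.find? (fun ip => PySem.Str.startswith ip p) with
    | some ip0 =>
      -- ip0 matches p, so its score is 0 and the minimum is 0
      have hmem := List.mem_of_find?_eq_some hfind
      have hsw : PySem.Str.startswith ip0 p = true := by
        have := List.find?_some hfind; simpa using this
      have hf0 : pvF (p :: ps) ip0 = 0 := by rw [pvF_cons, hsw]; simp
      have hMm0 : pvMm (p :: ps) ips = 0 := by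
        have hle := pvMm_le_mem (p :: ps) ip0 ips hmem
        omega
      have : ¬ (pvMm (p :: ps) ips = (p :: ps).length ∧ 0 < (p :: ps).length ∨ (p :: ps) = []) := by
        simp [hMm0, List.length_cons]
      rw [if_neg this, hMm0]
      rw [pvFind_congr_mem (q := fun ip => PySem.Str.startswith ip p)
        (fun x _ => by
          show (pvF (p :: ps) x == 0) = PySem.Str.startswith x p
          rw [pvF_cons]
          by_cases h : PySem.Str.startswith x p = true
          · rw [if_pos h, h]; rfl
          · rw [if_neg h]
            rw [Bool.not_eq_true] at h
            rw [h]; simp)]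
      exact hfind.symm
    | none =>
      -- no ip matches p: every score shifts by one
      have hno : ∀ x ∈ ips, PySem.Str.startswith x p = false := by
        intro x hx
        have := List.find?_eq_none.mp hfind x hx
        simpa using this
      have hshift : ∀ x ∈ ips, pvF (p :: ps) x = pvF ps x + 1 := by
        intro x hx; rw [pvF_cons, hno x hx]; simp
      have hMm : pvMm (p :: ps) ips = pvMm ps ips + 1 := by
        clear hfind ih
        induction ips with
        | nil => simp [pvMm]
        | cons y t ih2 =>
          simp only [pvMm, List.foldr] at *
          rw [hshift y (by simp)]
          rw [ih2 (fun x hx => hno x (by simp [hx])) (fun x hx => hshift x (by simp [hx]))]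
          omega
      rw [ih, hMm]
      by_cases hs : pvMm ps ips = ps.length ∧ 0 < ps.length ∨ ps = []
      · rw [if_pos hs, if_pos]
        rcases hs with ⟨h1, _⟩ | h1
        · left; simp [h1, List.length_cons]
        · left; subst h1; simp [List.length_cons, pvMm_nil]
      · have hne : ¬ (pvMm ps ips + 1 = (p :: ps).length ∧ 0 < (p :: ps).length ∨ (p :: ps) = []) := by
          have hpsne : ps ≠ [] := fun h => hs (Or.inr h)
          have hlen : 0 < ps.length := List.length_pos_iff.mpr hpsne
          intro hcontra
          rcases hcontra with ⟨h1, _⟩ | h1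
          · exact hs (Or.inl ⟨by simp [List.length_cons] at h1; omega, hlen⟩)
          · exact List.cons_ne_nil _ _ h1
        rw [if_neg hs, if_neg hne]
        exact pvFind_congr_mem (fun x hx => by
          rw [hshift x hx]; simp)
  
-- characterization of B's loop: the first element of b :: l attaining the minimum
theorem pvBLoopG_char (ps : List String) (l : List String) (b : String) :
    (b :: l).find? (fun ip => pvF ps ip == pvMm ps (b :: l)) = some (pvBLoopG ps l b (pvF ps b)) := by
  induction l generalizing b with
  | nil =>
    have : pvMm ps [b] = pvF ps b := by
      simp only [pvMm, List.foldr]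
      have := pvF_le ps b; omega
    simp [pvBLoopG, this]
  | cons ip t ih =>
    simp only [pvBLoopG]
    by_cases h : pvF ps ip < pvF ps b
    · rw [if_pos h]
      have hM : pvMm ps (b :: ip :: t) = pvMm ps (ip :: t) := by
        have h2 : pvMm ps (ip :: t) ≤ pvF ps ip := by
          simp only [pvMm, List.foldr]; omega
        simp only [pvMm, List.foldr] at *; omega
      rw [hM]
      have hb : (pvF ps b == pvMm ps (ip :: t)) = false := by
        have h2 : pvMm ps (ip :: t) ≤ pvF ps ip := by
          simp only [pvMm, List.foldr]; omega
        simp; omega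
      simp only [List.find?, hb]
      exact ih ip
    · rw [if_neg h]
      have hble : pvF ps b ≤ pvF ps ip := by omega
      have hM : pvMm ps (b :: ip :: t) = pvMm ps (b :: t) := by
        simp only [pvMm, List.foldr]; omega
      rw [hM]
      have := ih b
      by_cases hb : pvF ps b = pvMm ps (b :: t)
      · simp only [List.find?, hb] at this ⊢
        simpa using this
      · have h2 : pvMm ps (b :: t) ≤ pvF ps b := by
          simp only [pvMm, List.foldr]; omega
        have hip : (pvF ps ip == pvMm ps (b :: t)) = false := by simp; omega
        have hbb : (pvF ps b == pvMm ps (b :: t)) = false := by simp [hb]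
        simp only [List.find?, hbb, hip] at this ⊢
        exact this

-- ===== VERDICT (by name: the statement is the Claim_ definition above) =====
theorem choose_recommended_ip_spec : Claim_equal_choose_recommended_ip := by
  intro ips _
  show choose_recommended_ip ips = choose_recommended_ip_alt ips
  cases ips with
  | nil => rfl
  | cons x rest =>
    simp only [choose_recommended_ip, choose_recommended_ip_alt, pvBLoop_eq_G]
    have hchar := pvAOuter_char pvPrefixes (x :: rest)
    have hB := pvBLoopG_char pvPrefixes rest x
    have hFx : pvScore x = pvF pvPrefixes x := rfl
    rw [hFx]
    by_cases hs : pvMm pvPrefixes (x :: rest) = pvPrefixes.length ∧ 0 < pvPrefixes.length ∨ pvPrefixes = []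
    · -- no ip matches any prefix: A falls back to ips[0], B never updates
      rw [if_pos hs] at hchar
      rw [hchar]
      -- every member's score is the sentinel, in particular x's: find? picks x
      rcases hs with ⟨h1, _⟩ | h1
      · have hxle := pvF_le pvPrefixes x
        have hxge : pvMm pvPrefixes (x :: rest) ≤ pvF pvPrefixes x := by
          simp only [pvMm, List.foldr]; omega
        have hx : (pvF pvPrefixes x == pvMm pvPrefixes (x :: rest)) = true := by simp; omega
        simp only [List.find?, hx] at hB
        simp at hB
        show some x = some (pvBLoopG pvPrefixes rest x (pvF pvPrefixes x))
        exact congrArg some hB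
      · exact absurd h1 (by decide)
    · rw [if_neg hs] at hchar
      rw [hchar, hB]
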